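-- pv_equiv track=rewrite | github.com/nziegler87/FoundationsOfCompSci | Project/Fiddle Files/diagonal_test2.py | antidiagonals_lst
-- ===== SOURCE A (Python) =====
-- def antidiagonals_lst(lst):
--     """
--     """
--     height = len(lst)
--     width = len(lst[0])
--     master = []
--     for p in range(height + width - 1):
--         mini = []
--         for q in range(max(p - height + 1,0), min(p+1, width)):
--             mini.append(lst[p - q][q])
--         master.append(mini)
--     return master
-- ===== SOURCE B (Python) =====
-- def antidiagonals_lst(lst):
--     height = len(lst)
--     width = len(lst[0])
--     master = [[] for _ in range(height + width - 1)]
--     for j in range(width):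
--         for i in range(height):
--             master[i + j].append(lst[i][j])
--     return master
-- ===== Notes on version B (the rewrite author's own statement) =====
-- stated objective: alternative
-- what changed: B scatters each element lst[i][j] into a pre-allocated antidiagonal bucket master[i+j] in one flat column-outer/row-inner pass, instead of gathering each diagonal separately with computed per-diagonal index bounds.
import Mathlib
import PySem

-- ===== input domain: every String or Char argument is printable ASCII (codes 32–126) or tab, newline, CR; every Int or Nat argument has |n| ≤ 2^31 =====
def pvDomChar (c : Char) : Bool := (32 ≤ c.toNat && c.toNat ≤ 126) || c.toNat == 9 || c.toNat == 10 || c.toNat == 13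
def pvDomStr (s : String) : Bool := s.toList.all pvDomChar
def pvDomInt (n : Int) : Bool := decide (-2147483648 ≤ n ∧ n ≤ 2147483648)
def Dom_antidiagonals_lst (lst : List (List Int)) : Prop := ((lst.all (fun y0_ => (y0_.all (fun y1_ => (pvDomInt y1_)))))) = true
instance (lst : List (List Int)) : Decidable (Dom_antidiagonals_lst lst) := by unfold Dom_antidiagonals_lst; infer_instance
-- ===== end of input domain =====

-- B scatters each element into a pre-allocated antidiagonal bucket master[i+j] in one
-- flat column-outer pass instead of gathering each diagonal with computed index bounds
-- (objective: alternative decomposition, same cost).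

-- ===== PORT A =====
def antidiagonals_lst (lst : List (List Int)) : List (List Int) :=
  let height : Int := lst.length
  let width : Int := (PySem.List.pyGetD lst 0 ([] : List Int)).length
  (PySem.List.pyRange 0 (height + width - 1) 1).foldl
    (fun master p =>
      master ++ [(PySem.List.pyRange (max (p - height + 1) 0) (min (p + 1) width) 1).foldl
        (fun mini q => mini ++ [PySem.List.pyGetD (PySem.List.pyGetD lst (p - q) ([] : List Int)) q 0]) []])
    []

-- ===== PORT B =====
def antidiagonals_lst_alt (lst : List (List Int)) : List (List Int) :=
  let height : Int := lst.length
  let width : Int := (PySem.List.pyGetD lst 0 ([] : List Int)).length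
  let master := (PySem.List.pyRange 0 (height + width - 1) 1).map (fun _ => ([] : List Int))
  (PySem.List.pyRange 0 width 1).foldl
    (fun m j =>
      (PySem.List.pyRange 0 height 1).foldl
        (fun m i => m.modify (i + j).toNat
          (fun row => row ++ [PySem.List.pyGetD (PySem.List.pyGetD lst i ([] : List Int)) j 0])) m)
    master

-- ===== PRECONDITION & SPEC =====
-- Pre_ excludes exactly the inputs where Python A raises IndexError: the empty matrix
-- (len(lst[0])) and matrices with a row shorter than row 0 (lst[p-q][q]).
def Pre_antidiagonals_lst (lst : List (List Int)) : Prop :=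
  lst ≠ [] ∧ ∀ row ∈ lst, (PySem.List.pyGetD lst 0 ([] : List Int)).length ≤ row.length
instance (lst : List (List Int)) : Decidable (Pre_antidiagonals_lst lst) := by
  unfold Pre_antidiagonals_lst; infer_instance

def pvWitness_antidiagonals_lst : List (List Int) := [[1, 2], [3, 4]]

def Spec_antidiagonals_lst (lst : List (List Int)) (out : List (List Int)) : Prop := out = antidiagonals_lst_alt lst
instance (lst : List (List Int)) (out : List (List Int)) : Decidable (Spec_antidiagonals_lst lst out) := by unfold Spec_antidiagonals_lst; infer_instance

-- ===== CLAIM (what is proved, stated in full; the proofs are below) =====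
def Claim_equal_antidiagonals_lst : Prop := ∀ (lst : List (List Int)), Dom_antidiagonals_lst lst → Pre_antidiagonals_lst lst → Spec_antidiagonals_lst lst (antidiagonals_lst lst)

-- ===== LEMMAS AND PROOFS =====

-- lst[i][j] with default 0 (both ports read elements through this expression)
def pvEE (lst : List (List Int)) (i j : Int) : Int :=
  PySem.List.pyGetD (PySem.List.pyGetD lst i ([] : List Int)) j 0

theorem pv_foldl_push_eq_map {α β : Type} (f : α → β) (xs : List α) (init : List β) :
    xs.foldl (fun acc x => acc ++ [f x]) init = init ++ xs.map f := by
  induction xs generalizing init with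
  | nil => simp
  | cons x xs ih => simp [List.foldl_cons, ih]

-- A in gather normal form
theorem pv_A_eq_map (lst : List (List Int)) :
    antidiagonals_lst lst =
      (PySem.List.pyRange 0 ((lst.length : Int) + ((PySem.List.pyGetD lst 0 ([] : List Int)).length : Int) - 1) 1).map
        (fun p => (PySem.List.pyRange (max (p - (lst.length : Int) + 1) 0)
            (min (p + 1) ((PySem.List.pyGetD lst 0 ([] : List Int)).length : Int)) 1).map
          (fun q => pvEE lst (p - q) q)) := by
  simp only [antidiagonals_lst, pvEE, pv_foldl_push_eq_map, List.nil_append]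

-- length of B's inner (one-column) fold
theorem pv_col_len (lst : List (List Int)) (j : Int) (k : Nat) (m : List (List Int)) :
    ((PySem.List.pyRange 0 (k : Int) 1).foldl
      (fun m i => m.modify (i + j).toNat (fun row => row ++ [pvEE lst i j])) m).length = m.length := by
  induction k with
  | zero =>
    simp only [Nat.cast_zero, PySem.List.pyRange_one_eq_nil (le_refl (0 : Int)), List.foldl_nil]
  | succ k ih =>
    have hc : ((k + 1 : Nat) : Int) = (k : Int) + 1 := by push_cast; ring
    rw [hc, PySem.List.pyRange_one_succ_right (Int.natCast_nonneg k), List.foldl_append]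
    simp only [List.foldl_cons, List.foldl_nil, List.length_modify, ih]

-- element of B's inner (one-column) fold
theorem pv_col_get (lst : List (List Int)) (j : Int) (hj : 0 ≤ j) (k : Nat) (m : List (List Int))
    (p : Nat) (hp : p < m.length) :
    ((PySem.List.pyRange 0 (k : Int) 1).foldl
        (fun m i => m.modify (i + j).toNat (fun row => row ++ [pvEE lst i j])) m)[p]'(by
          rw [pv_col_len]; exact hp) =
      if j ≤ (p : Int) ∧ (p : Int) < j + k then m[p] ++ [pvEE lst ((p : Int) - j) j] else m[p] := by
  induction k with
  | zero =>
    simp only [Nat.cast_zero, PySem.List.pyRange_one_eq_nil (le_refl (0 : Int)), List.foldl_nil]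
    rw [if_neg (by omega)]
  | succ k ih =>
    have hc : ((k + 1 : Nat) : Int) = (k : Int) + 1 := by push_cast; ring
    simp only [hc, PySem.List.pyRange_one_succ_right (Int.natCast_nonneg k), List.foldl_append,
      List.foldl_cons, List.foldl_nil]
    rw [List.getElem_modify]
    by_cases hpk : ((k : Int) + j).toNat = p
    · rw [if_pos hpk]
      simp only [ih]
      rw [if_neg (by omega), if_pos (by constructor <;> omega)]
      have hkp : (p : Int) - j = (k : Int) := by omega
      rw [hkp]
    · rw [if_neg hpk]
      simp only [ih]
      have hiff : (j ≤ (p : Int) ∧ (p : Int) < j + ((k : Int) + 1)) ↔ (j ≤ (p : Int) ∧ (p : Int) < j + (k : Int)) := by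
        omega
      rw [if_congr hiff rfl rfl]

-- length of B's outer fold
theorem pv_out_len (lst : List (List Int)) (jn : Nat) (m0 : List (List Int)) :
    ((PySem.List.pyRange 0 (jn : Int) 1).foldl
      (fun m j => (PySem.List.pyRange 0 (lst.length : Int) 1).foldl
        (fun m i => m.modify (i + j).toNat (fun row => row ++ [pvEE lst i j])) m) m0).length
      = m0.length := by
  induction jn with
  | zero =>
    simp only [Nat.cast_zero, PySem.List.pyRange_one_eq_nil (le_refl (0 : Int)), List.foldl_nil]
  | succ jn ih =>
    have hc : ((jn + 1 : Nat) : Int) = (jn : Int) + 1 := by push_cast; ring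
    rw [hc, PySem.List.pyRange_one_succ_right (Int.natCast_nonneg jn), List.foldl_append]
    simp only [List.foldl_cons, List.foldl_nil]
    rw [pv_col_len, ih]

-- element of B's outer fold after the first jn columns
theorem pv_out_get (lst : List (List Int)) (jn : Nat)
    (m0 : List (List Int)) (h0 : ∀ (p : Nat) (hp : p < m0.length), m0[p] = ([] : List Int))
    (p : Nat) (hp : p < m0.length) :
    ((PySem.List.pyRange 0 (jn : Int) 1).foldl
        (fun m j => (PySem.List.pyRange 0 (lst.length : Int) 1).foldl
          (fun m i => m.modify (i + j).toNat (fun row => row ++ [pvEE lst i j])) m) m0)[p]'(by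
            rw [pv_out_len]; exact hp) =
      (PySem.List.pyRange (max ((p : Int) - (lst.length : Int) + 1) 0)
          (min ((p : Int) + 1) (jn : Int)) 1).map (fun q => pvEE lst ((p : Int) - q) q) := by
  induction jn with
  | zero =>
    simp only [Nat.cast_zero, PySem.List.pyRange_one_eq_nil (le_refl (0 : Int)), List.foldl_nil]
    rw [h0 p hp, PySem.List.pyRange_one_eq_nil (by omega)]
    simp
  | succ jn ih =>
    have hc : ((jn + 1 : Nat) : Int) = (jn : Int) + 1 := by push_cast; ring
    simp only [hc, PySem.List.pyRange_one_succ_right (Int.natCast_nonneg jn), List.foldl_append,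
      List.foldl_cons, List.foldl_nil]
    have hplen : p < ((PySem.List.pyRange 0 (jn : Int) 1).foldl
        (fun m j => (PySem.List.pyRange 0 (lst.length : Int) 1).foldl
          (fun m i => m.modify (i + j).toNat (fun row => row ++ [pvEE lst i j])) m) m0).length := by
      rw [pv_out_len]; exact hp
    have hcol := pv_col_get lst (jn : Int) (Int.natCast_nonneg jn) lst.length _ p hplen
    simp only [hcol, ih]
    by_cases hcond : (jn : Int) ≤ (p : Int) ∧ (p : Int) < (jn : Int) + (lst.length : Nat)
    · rw [if_pos hcond]
      have h1 : min ((p : Int) + 1) ((jn : Int) + 1) = (jn : Int) + 1 := by omega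
      have h2 : min ((p : Int) + 1) ((jn : Int)) = (jn : Int) := by omega
      have h3 : max ((p : Int) - (lst.length : Int) + 1) 0 ≤ (jn : Int) := by omega
      rw [h1, h2, PySem.List.pyRange_one_succ_right h3, List.map_append]
      simp
    · rw [if_neg hcond]
      by_cases hpj : (p : Int) < (jn : Int)
      · have h1 : min ((p : Int) + 1) ((jn : Int) + 1) = min ((p : Int) + 1) ((jn : Int)) := by omega
        rw [h1]
      · rw [PySem.List.pyRange_one_eq_nil (by omega : min ((p : Int) + 1) ((jn : Int)) ≤ max ((p : Int) - (lst.length : Int) + 1) 0),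
            PySem.List.pyRange_one_eq_nil (by omega : min ((p : Int) + 1) ((jn : Int) + 1) ≤ max ((p : Int) - (lst.length : Int) + 1) 0)]

theorem pv_ee_fold (lst : List (List Int)) (i j : Int) :
    PySem.List.pyGetD (PySem.List.pyGetD lst i ([] : List Int)) j 0 = pvEE lst i j := rfl

-- ===== VERDICT (by name: the statement is the Claim_ definition above) =====
theorem antidiagonals_lst_spec : Claim_equal_antidiagonals_lst := by
  intro lst _ _
  unfold Spec_antidiagonals_lst
  rw [pv_A_eq_map]
  simp only [antidiagonals_lst_alt, pv_ee_fold]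
  apply List.ext_getElem
  · simp only [List.length_map, pv_out_len]
  · intro p h1 h2
    rw [pv_out_len] at h2
    have h0 : ∀ (q : Nat) (hq : q < ((PySem.List.pyRange 0 ((lst.length : Int) + ((PySem.List.pyGetD lst 0 ([] : List Int)).length : Int) - 1) 1).map (fun _ => ([] : List Int))).length),
        ((PySem.List.pyRange 0 ((lst.length : Int) + ((PySem.List.pyGetD lst 0 ([] : List Int)).length : Int) - 1) 1).map (fun _ => ([] : List Int)))[q] = ([] : List Int) := by
      intro q hq; simp
    have hout := pv_out_get lst ((PySem.List.pyGetD lst 0 ([] : List Int)).length) _ h0 p h2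
    simp only [hout, List.getElem_map, PySem.List.getElem_pyRange_one, zero_add]
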